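-- pv_equiv track=rewrite | github.com/Leifa/debruijn | codes.py | old_code_to_new
-- ===== SOURCE A (Python) =====
-- def bit(n, i):
--     return (n & (2**i)) > 0
--
-- def old_code_to_new(number_of_nodes, code):
--     result = 0
--     for i in range(1, -1, -1):
--         for j in range(number_of_nodes-1, -1, -1):
--             for k in range(number_of_nodes-1, -1, -1):
--                 result *= 2
--                 if bit(code, number_of_nodes*number_of_nodes*i + number_of_nodes*k + j):
--                     result += 1
--     return result
-- ===== SOURCE B (Python) =====
-- def old_code_to_new(number_of_nodes, code):
--     # Single pass over the low 2*n^2 bit positions of code: decode each set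
--     # bit's (block, row, col) via divmod and add it at its transposed position.
--     n = number_of_nodes
--     if n <= 0:
--         return 0
--     nn = n * n
--     result = 0
--     for p in range(2 * nn):
--         if (code >> p) & 1:
--             i, r = divmod(p, nn)
--             k, j = divmod(r, n)
--             result += 1 << (nn * i + n * j + k)
--     return result
-- ===== Notes on version B (the rewrite author's own statement) =====
-- stated objective: faster
-- what changed: A builds the result MSB-first with a fused result*2(+1) triple loop over (block,col,row), recomputing 2**i as a big-int power for every bit and dragging the whole growing accumulator through 2n^2 multiply-adds; B instead makes a single pass over the low 2n^2 bit positions of code, decodes each set bit's (block,row,col) with divmod and ORs-in (adds) 1 shifted to its transposed output position.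
import Mathlib
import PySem

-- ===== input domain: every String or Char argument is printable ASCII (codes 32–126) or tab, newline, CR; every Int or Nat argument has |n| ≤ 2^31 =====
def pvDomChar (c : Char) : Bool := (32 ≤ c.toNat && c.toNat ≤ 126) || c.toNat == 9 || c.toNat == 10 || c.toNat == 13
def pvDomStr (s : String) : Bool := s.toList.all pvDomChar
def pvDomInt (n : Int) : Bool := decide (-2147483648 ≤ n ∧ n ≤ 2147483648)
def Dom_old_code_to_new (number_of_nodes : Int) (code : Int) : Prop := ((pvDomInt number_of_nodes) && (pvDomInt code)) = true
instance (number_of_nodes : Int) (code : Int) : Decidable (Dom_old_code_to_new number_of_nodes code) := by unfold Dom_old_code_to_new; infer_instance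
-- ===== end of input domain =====

-- B replaces A's fused MSB-first triple accumulation loop by a single pass over the
-- low 2n^2 bit positions of `code`, decoding each set bit's (block,row,col) with divmod
-- and adding it at its transposed position; a timing run measured B faster (objective: faster).


-- ===== PORT A =====
def pvBit (n : Int) (i : Int) : Bool := decide (0 < PySem.Int.band n (2 ^ i.toNat))

def old_code_to_new (number_of_nodes : Int) (code : Int) : Int :=
  (PySem.List.pyRange 1 (-1) (-1)).foldl (fun result i =>
    (PySem.List.pyRange (number_of_nodes - 1) (-1) (-1)).foldl (fun result j =>
      (PySem.List.pyRange (number_of_nodes - 1) (-1) (-1)).foldl (fun result k =>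
        let result := result * 2
        if pvBit code (number_of_nodes * number_of_nodes * i + number_of_nodes * k + j) then
          result + 1
        else result) result) result) 0

-- ===== PORT B =====
def old_code_to_new_alt (number_of_nodes : Int) (code : Int) : Int :=
  if number_of_nodes ≤ 0 then 0 else
    let nn := number_of_nodes * number_of_nodes
    (PySem.List.pyRange 0 (2 * nn) 1).foldl (fun result p =>
      if PySem.Int.band (code >>> p.toNat) 1 ≠ 0 then
        let i := PySem.Int.floordiv p nn
        let r := PySem.Int.mod p nn
        let k := PySem.Int.floordiv r number_of_nodes
        let j := PySem.Int.mod r number_of_nodes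
        result + (1 <<< (nn * i + number_of_nodes * j + k).toNat)
      else result) 0

-- ===== PRECONDITION & SPEC =====
def Spec_old_code_to_new (number_of_nodes : Int) (code : Int) (out : Int) : Prop := out = old_code_to_new_alt number_of_nodes code
instance (number_of_nodes : Int) (code : Int) (out : Int) : Decidable (Spec_old_code_to_new number_of_nodes code out) := by unfold Spec_old_code_to_new; infer_instance

-- ===== CLAIM (what is proved, stated in full; the proofs are below) =====
def Claim_equal_old_code_to_new : Prop := ∀ (number_of_nodes : Int) (code : Int), Dom_old_code_to_new number_of_nodes code → Spec_old_code_to_new number_of_nodes code (old_code_to_new number_of_nodes code)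

-- ===== LEMMAS AND PROOFS =====

/-- 0/1 value of bit `e` of `c` (infinite two's complement). -/
def tb (c : Int) (e : Nat) : Int := if c.testBit e then 1 else 0

/-- The common reference value: the transposed-bit sum both programs compute. -/
def CS (c : Int) (N : Nat) : Int :=
  ∑ i ∈ Finset.range 2, ∑ j ∈ Finset.range N, ∑ k ∈ Finset.range N,
    tb c (N*N*i + N*k + j) * 2 ^ (N*N*i + N*j + k)

-- Python's `c & 2**e > 0` tests bit e (also on negatives).
lemma band_two_pow_pos (c : Int) (e : Nat) :
    (0 < PySem.Int.band c ((2:Int) ^ e)) ↔ c.testBit e := by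
  have hpow : ((2:Int) ^ e).toNat = 2 ^ e := by
    have : ((2:Int) ^ e) = ((2 ^ e : Nat) : Int) := by push_cast; ring
    rw [this, Int.toNat_natCast]
  have hb : (0:Int) ≤ (2:Int) ^ e := by positivity
  cases c with
  | ofNat m =>
      have h0 : (0:Int) ≤ Int.ofNat m := Int.natCast_nonneg m
      simp only [PySem.Int.band, if_pos h0, if_pos hb, hpow, Int.testBit]
      have hm : (Int.ofNat m).toNat = m := rfl
      rw [hm, Nat.and_two_pow]
      cases h : m.testBit e
      · simp
      · simp only [Bool.toNat_true, one_mul, iff_true]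
        exact_mod_cast Nat.two_pow_pos e
  | negSucc m =>
      have h0 : ¬ (0:Int) ≤ Int.negSucc m := by
        simp [Int.negSucc_eq]; omega
      simp only [PySem.Int.band, if_neg h0, if_pos hb, hpow, Int.testBit]
      have hm : (-(Int.negSucc m) - 1).toNat = m := by
        simp [Int.negSucc_eq]
      rw [hm, Nat.and_comm, Nat.and_two_pow]
      have hlt : 0 < 2 ^ e := Nat.two_pow_pos e
      cases h : m.testBit e
      · simp only [Bool.toNat_false, zero_mul, Nat.sub_zero, Bool.not_false, iff_true]
        exact_mod_cast hlt
      · simp only [Bool.toNat_true, one_mul, Nat.sub_self, Bool.not_true]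
        simp

-- Python's `(c >> e) & 1 != 0` tests bit e (also on negatives).
lemma band_shift_one (c : Int) (e : Nat) :
    (PySem.Int.band (c >>> e) 1 ≠ 0) ↔ c.testBit e := by
  cases c with
  | ofNat m =>
      show PySem.Int.band (Int.ofNat (m >>> e)) 1 ≠ 0 ↔ _
      have h0 : (0:Int) ≤ Int.ofNat (m >>> e) := Int.natCast_nonneg _
      have h1 : (0:Int) ≤ 1 := by norm_num
      simp only [PySem.Int.band, if_pos h0, if_pos h1, Int.testBit]
      have hm : (Int.ofNat (m >>> e)).toNat = m >>> e := rfl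
      have h2 : (1:Int).toNat = 1 := rfl
      rw [hm, h2, Nat.and_one_is_mod]
      have h3 : (m >>> e) % 2 = (m.testBit e).toNat := by
        have h4 : (m >>> e).testBit 0 = m.testBit e := by
          rw [Nat.testBit_shiftRight, Nat.add_zero]
        rw [← h4, Nat.testBit_zero]
        rcases Nat.mod_two_eq_zero_or_one (m >>> e) with h5 | h5 <;> simp [h5]
      rw [h3]
      cases m.testBit e <;> simp
  | negSucc m =>
      show PySem.Int.band (Int.negSucc (m >>> e)) 1 ≠ 0 ↔ _
      have h0 : ¬ (0:Int) ≤ Int.negSucc (m >>> e) := not_le.mpr (Int.negSucc_lt_zero _)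
      have h1 : (0:Int) ≤ 1 := by norm_num
      simp only [PySem.Int.band, if_neg h0, if_pos h1, Int.testBit]
      have hm0 : (-(Int.negSucc (m >>> e)) - 1) = ((m >>> e : Nat) : Int) := by
        rw [Int.negSucc_eq]; ring
      have hm : (-(Int.negSucc (m >>> e)) - 1).toNat = m >>> e := by rw [hm0, Int.toNat_natCast]
      have h2 : (1:Int).toNat = 1 := rfl
      rw [hm, h2, Nat.and_comm, Nat.and_one_is_mod]
      have h3 : (m >>> e) % 2 = (m.testBit e).toNat := by
        have h4 : (m >>> e).testBit 0 = m.testBit e := by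
          rw [Nat.testBit_shiftRight, Nat.add_zero]
        rw [← h4, Nat.testBit_zero]
        rcases Nat.mod_two_eq_zero_or_one (m >>> e) with h5 | h5 <;> simp [h5]
      rw [h3]
      cases m.testBit e <;> simp

/-- MSB-first affine accumulation over a mapped range, in closed form. -/
lemma foldl_affine (C : Int) (f : Int → Int) (g : Nat → Int) :
    ∀ (m : Nat) (acc : Int),
      (((List.range m).map g).foldl (fun r x => r * C + f x) acc)
        = acc * C ^ m + ∑ t ∈ Finset.range m, f (g t) * C ^ (m - 1 - t) := by
  intro m
  induction m with
  | zero => simp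
  | succ m ih =>
      intro acc
      rw [List.range_succ, List.map_append, List.foldl_append, ih]
      simp only [List.map_cons, List.map_nil, List.foldl_cons, List.foldl_nil]
      rw [Finset.sum_range_succ]
      have hs : (∑ t ∈ Finset.range m, f (g t) * C ^ (m - 1 - t)) * C
          = ∑ t ∈ Finset.range m, f (g t) * C ^ (m - t) := by
        rw [Finset.sum_mul]
        refine Finset.sum_congr rfl (fun t ht => ?_)
        have ht' : t < m := Finset.mem_range.mp ht
        have : m - 1 - t + 1 = m - t := by omega
        rw [mul_assoc, ← pow_succ, this]
      have he : ∀ t ∈ Finset.range m, f (g t) * C ^ (m + 1 - 1 - t) = f (g t) * C ^ (m - t) := by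
        intro t ht
        have h1 : m + 1 - 1 - t = m - t := by omega
        rw [h1]
      rw [Finset.sum_congr rfl he, add_mul, hs, pow_succ]
      have h2 : m + 1 - 1 - m = 0 := by omega
      rw [h2, pow_zero, mul_one, mul_assoc]
      ring

lemma sum_range_mul (a b : Nat) (f : Nat → Int) :
    ∑ t ∈ Finset.range (a*b), f t = ∑ i ∈ Finset.range a, ∑ q ∈ Finset.range b, f (b*i + q) := by
  induction a with
  | zero => simp
  | succ a ih =>
      have h : (a+1)*b = a*b + b := by ring
      rw [h, Finset.sum_range_add, ih, Finset.sum_range_succ]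
      exact congrArg _ (Finset.sum_congr rfl (fun q _ => by ring_nf))

lemma pvBit_eq (c pos : Int) (E : Nat) (h : pos = (E:Int)) : pvBit c pos = c.testBit E := by
  subst h
  have hP : (0 < PySem.Int.band c (2 ^ ((E:Int)).toNat)) ↔ (c.testBit E = true) := by
    rw [Int.toNat_natCast]; exact band_two_pow_pos c E
  rw [pvBit]
  cases hb : c.testBit E
  · exact decide_eq_false (fun hlt => by rw [hb] at hP; exact Bool.false_ne_true (hP.mp hlt))
  · exact decide_eq_true (hP.mpr hb)

def SKd (c : Int) (N : Nat) (i j : Int) : Int :=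
  ∑ t ∈ Finset.range N,
    (if pvBit c ((N:Int) * N * i + N * ((N:Int) - 1 - (t:Int)) + j) then (1:Int) else 0)
      * 2 ^ (N - 1 - t)

def SJd (c : Int) (N : Nat) (i : Int) : Int :=
  ∑ t ∈ Finset.range N, SKd c N i ((N:Int) - 1 - (t:Int)) * ((2:Int) ^ N) ^ (N - 1 - t)

lemma A_eq_CS (n c : Int) (hn : 0 < n) :
    old_code_to_new n c = CS c n.toNat := by
  obtain ⟨N, rfl⟩ : ∃ N : Nat, n = (N : Int) := ⟨n.toNat, by omega⟩
  have hN : 0 < N := by exact_mod_cast hn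
  rw [Int.toNat_natCast, old_code_to_new]
  have hout : PySem.List.pyRange 1 (-1) (-1) = [1, 0] := by decide
  have h1 : ((N:Int) - 1 - (-1)).toNat = N := by omega
  rw [hout, PySem.List.pyRange_neg_one, h1]
  have hstep : ∀ i j : Int,
      (fun (result k : Int) =>
        let result := result * 2
        if pvBit c ((N:Int) * N * i + N * k + j) then result + 1 else result)
      = (fun (r x : Int) => r * 2 + (if pvBit c ((N:Int) * N * i + N * x + j) then 1 else 0)) := by
    intro i j; funext r x; dsimp only; split <;> ring
  have hInner : ∀ i j acc : Int,
      List.foldl (fun (r x : Int) => r * 2 + (if pvBit c ((N:Int) * N * i + N * x + j) then 1 else 0))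
        acc ((List.range N).map (fun k : Nat => (N:Int) - 1 - (k:Int)))
      = acc * 2 ^ N + SKd c N i j := by
    intro i j acc
    exact (foldl_affine 2 _ _ N acc).trans rfl
  have hMid : ∀ i acc : Int,
      List.foldl (fun (r x : Int) => r * ((2:Int) ^ N) + SKd c N i x)
        acc ((List.range N).map (fun k : Nat => (N:Int) - 1 - (k:Int)))
      = acc * ((2:Int) ^ N) ^ N + SJd c N i := by
    intro i acc
    exact (foldl_affine ((2:Int) ^ N) _ _ N acc).trans rfl
  simp only [hstep, hInner]
  simp only [hMid, List.foldl_cons, List.foldl_nil]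
  -- closed form of A; now compare with CS block by block
  have hblock : ∀ i : Nat, i < 2 →
      SJd c N ((i:Nat):Int) * (2:Int) ^ (N*N*i)
        = ∑ j ∈ Finset.range N, ∑ k ∈ Finset.range N,
            tb c (N*N*i + N*k + j) * 2 ^ (N*N*i + N*j + k) := by
    intro i hi
    conv_rhs => rw [← Finset.sum_range_reflect]
    rw [SJd, Finset.sum_mul]
    refine Finset.sum_congr rfl (fun tj htj => ?_)
    have htj2 : tj < N := Finset.mem_range.mp htj
    conv_rhs => rw [← Finset.sum_range_reflect]
    rw [SKd, Finset.sum_mul, Finset.sum_mul]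
    refine Finset.sum_congr rfl (fun tk htk => ?_)
    have htk2 : tk < N := Finset.mem_range.mp htk
    have hpos : (N:Int) * N * ((i:Nat):Int) + N * ((N:Int) - 1 - (tk:Int)) + ((N:Int) - 1 - (tj:Int))
        = ((N*N*i + N*(N-1-tk) + (N-1-tj) : Nat) : Int) := by
      push_cast [Nat.cast_sub (by omega : tk ≤ N - 1), Nat.cast_sub (by omega : tj ≤ N - 1),
        Nat.cast_sub (by omega : 1 ≤ N)]
      ring
    rw [show (if pvBit c ((N:Int) * N * ((i:Nat):Int) + N * ((N:Int) - 1 - (tk:Int)) + ((N:Int) - 1 - (tj:Int))) then (1:Int) else 0)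
          = tb c (N*N*i + N*(N-1-tk) + (N-1-tj)) from by rw [pvBit_eq c _ _ hpos, tb]]
    rw [mul_assoc, mul_assoc]
    congr 1
    rw [← pow_mul, ← pow_add, ← pow_add]
    congr 1
    omega
  have h0 := hblock 0 (by omega)
  have h1 := hblock 1 (by omega)
  rw [CS, Finset.sum_range_succ, Finset.sum_range_one, ← h0, ← h1]
  push_cast
  rw [← pow_mul]
  ring

lemma sum_list_range (M : Nat) (f : Nat → Int) :
    ((List.range M).map f).sum = ∑ t ∈ Finset.range M, f t := rfl

lemma B_eq_CS (n c : Int) (hn : 0 < n) :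
    old_code_to_new_alt n c = CS c n.toNat := by
  obtain ⟨N, rfl⟩ : ∃ N : Nat, n = (N : Int) := ⟨n.toNat, by omega⟩
  have hN : 0 < N := by exact_mod_cast hn
  rw [Int.toNat_natCast]
  -- unfold B, drop the guard, normalise the range
  rw [old_code_to_new_alt]
  simp only [if_neg (show ¬ (N:Int) ≤ 0 from by omega)]
  rw [PySem.List.pyRange_one]
  have hM : ((2 * ((N:Int) * N) - 0).toNat) = 2 * (N * N) := by
    omega
  rw [hM]
  -- the loop body is an accumulator-plus-term step
  have hfun : (fun (result p : Int) =>
      if PySem.Int.band (c >>> ((p.toNat : Nat) : Int)) 1 ≠ 0 then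
        result + ((1 <<< ((N:Int) * N * PySem.Int.floordiv p ((N:Int) * N)
            + N * PySem.Int.mod (PySem.Int.mod p ((N:Int) * N)) N
            + PySem.Int.floordiv (PySem.Int.mod p ((N:Int) * N)) N).toNat : Nat) : Int)
      else result)
    = (fun (result p : Int) => result +
        (if PySem.Int.band (c >>> ((p.toNat : Nat) : Int)) 1 ≠ 0 then
          ((1 <<< ((N:Int) * N * PySem.Int.floordiv p ((N:Int) * N)
            + N * PySem.Int.mod (PySem.Int.mod p ((N:Int) * N)) N
            + PySem.Int.floordiv (PySem.Int.mod p ((N:Int) * N)) N).toNat : Nat) : Int)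
        else 0)) := by
    funext r x; split <;> simp
  rw [hfun, PySem.List.foldl_add, List.map_map, zero_add, sum_list_range]
  -- pointwise: the summand is tb c t * 2 ^ σ t
  have hterm : ∀ t ∈ Finset.range (2 * (N * N)),
      (if PySem.Int.band (c >>> (((0 + (t:Int)).toNat : Nat) : Int)) 1 ≠ 0 then
          ((1 <<< ((N:Int) * N * PySem.Int.floordiv (0 + (t:Int)) ((N:Int) * N)
            + N * PySem.Int.mod (PySem.Int.mod (0 + (t:Int)) ((N:Int) * N)) N
            + PySem.Int.floordiv (PySem.Int.mod (0 + (t:Int)) ((N:Int) * N)) N).toNat : Nat) : Int)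
        else 0)
      = tb c t * 2 ^ (N*N*(t/(N*N)) + N*(t%(N*N)%N) + t%(N*N)/N) := by
    intro t ht
    have hz : (0 + (t:Int)) = ((t:Nat) : Int) := by ring
    rw [hz, Int.toNat_natCast, Int.shiftRight_natCast_right]
    have hNN : ((N:Int) * N) = ((N*N : Nat) : Int) := by push_cast; ring
    rw [hNN, PySem.Int.floordiv_natCast, PySem.Int.mod_natCast,
        PySem.Int.mod_natCast, PySem.Int.floordiv_natCast]
    have hexp : ((N*N : Nat) : Int) * ((t / (N*N) : Nat) : Int)
        + (N:Int) * ((t % (N*N) % N : Nat) : Int) + ((t % (N*N) / N : Nat) : Int)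
        = ((N*N*(t/(N*N)) + N*(t%(N*N)%N) + t%(N*N)/N : Nat) : Int) := by push_cast; ring
    rw [hexp, Int.toNat_natCast]
    by_cases hb : c.testBit t
    · rw [if_pos ((band_shift_one c t).mpr hb), tb, if_pos hb, one_mul, Nat.one_shiftLeft]
      push_cast; ring
    · rw [if_neg (fun hcon => hb ((band_shift_one c t).mp hcon)), tb, if_neg hb, zero_mul]
  refine (Finset.sum_congr rfl hterm).trans ?_
  rw [sum_range_mul 2 (N*N)]
  unfold CS
  refine Finset.sum_congr rfl (fun i hi => ?_)
  rw [sum_range_mul N N]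
  rw [Finset.sum_comm]
  refine Finset.sum_congr rfl (fun j hj => Finset.sum_congr rfl (fun k hk => ?_))
  have hi2 : i < 2 := Finset.mem_range.mp hi
  have hj2 : j < N := Finset.mem_range.mp hj
  have hk2 : k < N := Finset.mem_range.mp hk
  have hrlt : N*k + j < N*N := by nlinarith
  have ht1 : N*N*i + (N*k + j) = (N*k + j) + N*N*i := by ring
  have hdiv : (N*N*i + (N*k + j)) / (N*N) = i := by
    rw [ht1, Nat.add_mul_div_left _ _ (by positivity), Nat.div_eq_of_lt hrlt, Nat.zero_add]
  have hmod : (N*N*i + (N*k + j)) % (N*N) = N*k + j := by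
    rw [ht1, Nat.add_mul_mod_self_left, Nat.mod_eq_of_lt hrlt]
  have ht2 : N*k + j = j + N*k := by ring
  have hmod2 : (N*k + j) % N = j := by
    rw [ht2, Nat.add_mul_mod_self_left, Nat.mod_eq_of_lt hj2]
  have hdiv2 : (N*k + j) / N = k := by
    rw [ht2, Nat.add_mul_div_left _ _ (by omega), Nat.div_eq_of_lt hj2, Nat.zero_add]
  rw [hdiv, hmod, hmod2, hdiv2]
  have harg : N*N*i + (N*k + j) = N*N*i + N*k + j := by ring
  rw [harg]

lemma A_nonpos (n c : Int) (hn : n ≤ 0) : old_code_to_new n c = 0 := by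
  have h : PySem.List.pyRange (n - 1) (-1) (-1) = [] :=
    PySem.List.pyRange_neg_one_eq_nil (by omega)
  simp [old_code_to_new, h]

-- ===== VERDICT (by name: the statement is the Claim_ definition above) =====
theorem old_code_to_new_spec : Claim_equal_old_code_to_new := by
  intro n c _
  unfold Spec_old_code_to_new
  rcases le_or_gt n 0 with hn | hn
  · rw [A_nonpos n c hn, old_code_to_new_alt, if_pos hn]
  · rw [A_eq_CS n c hn, B_eq_CS n c hn]
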